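-- pv_equiv track=rewrite | github.com/Vicomtech/video-content-description-VCD | vcd/poly2d.py | simplifyAllFrontSequenceMovements
-- ===== SOURCE A (Python) =====
-- import math
--
-- def simplifyFrontSequenceMovements(_num, _low, _high, _low_symbol, _high_symbol, _next_steps):
--     if _high != -1:
--         res1 = int(math.floor(_num / _high))
--         res2 = int(_num % _high / _low)
--         res3 = int(_num % _high % _low)
--     else:
--         res1 = 0
--         res2 = int(_num / _low)
--         res3 = int(_num % _low)
--
--     for i in range(0, res1):
--         _next_steps.append(_high_symbol)  # _high_symbol: {SRF6DCC: 7} for high Roman numerals-like counting simplifications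
--     for i in range(0, res2):
--         _next_steps.append(_low_symbol)  # _low_symbol: {SRF6DCC: 6} for low Roman numerals-like counting simplifications
--     for i in range(0, res3):
--         _next_steps.append(0)
--     return _next_steps
--
-- def simplifyAllFrontSequenceMovements(_chaincode, _low, _high, _low_symbol, _high_symbol):
--     counter = 0
--     i = 0
--     while i < len(_chaincode):
--         if _chaincode[i] == 0:
--             counter += 1
--         elif _chaincode[i] != 0:
--             if counter >= _low:
--                 # i - counter //position of last 0 - counter
--                 next_steps = []
--                 next_steps = simplifyFrontSequenceMovements(counter, _low, _high, _low_symbol, _high_symbol, next_steps)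
--                 del _chaincode[i - counter: i]
--                 i -= counter
--                 _chaincode[i:i] = next_steps
--                 i += len(next_steps)
--             counter = 0
--         if i == len(_chaincode)-1:
--             if counter >= _low:
--                 next_steps = []
--                 next_steps = simplifyFrontSequenceMovements(counter, _low, _high, _low_symbol, _high_symbol, next_steps)
--                 del _chaincode[len(_chaincode)-counter:len(_chaincode)]
--                 i -= counter
--                 _chaincode[len(_chaincode):len(_chaincode)] = next_steps
--                 i += len(next_steps)
--             counter = 0
--         i += 1
--     return _chaincode
-- ===== SOURCE B (Python) =====
-- import math
--
--
-- def simplifyFrontSequenceMovements(_num, _low, _high, _low_symbol, _high_symbol, _next_steps):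
--     if _high != -1:
--         res1 = int(math.floor(_num / _high))
--         res2 = int(_num % _high / _low)
--         res3 = int(_num % _high % _low)
--     else:
--         res1 = 0
--         res2 = int(_num / _low)
--         res3 = int(_num % _low)
--
--     for i in range(0, res1):
--         _next_steps.append(_high_symbol)
--     for i in range(0, res2):
--         _next_steps.append(_low_symbol)
--     for i in range(0, res3):
--         _next_steps.append(0)
--     return _next_steps
--
--
-- def simplifyAllFrontSequenceMovements(_chaincode, _low, _high, _low_symbol, _high_symbol):
--     # Decompose into maximal runs of equal values and build a fresh output list:
--     # a zero-run of length >= _low is replaced by its counting symbols, any other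
--     # run is copied verbatim.  Written back in place to preserve A's mutation.
--     out = []
--     n = len(_chaincode)
--     j = 0
--     while j < n:
--         v = _chaincode[j]
--         k = j + 1
--         while k < n and _chaincode[k] == v:
--             k += 1
--         if v == 0 and k - j >= _low:
--             out.extend(simplifyFrontSequenceMovements(k - j, _low, _high, _low_symbol, _high_symbol, []))
--         else:
--             out.extend(_chaincode[j:k])
--         j = k
--     _chaincode[:] = out
--     return _chaincode
-- ===== Notes on version B (the rewrite author's own statement) =====
-- stated objective: alternative
-- what changed: Replaces A's in-place index-surgery loop (counting zeros element by element, then del/insert splices with index rewinding) by a run-decomposition pass: split the list into maximal runs of equal values, emit the compression of each qualifying zero-run (or the run verbatim) into a fresh output list, and assign it back in place.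
import Mathlib
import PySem

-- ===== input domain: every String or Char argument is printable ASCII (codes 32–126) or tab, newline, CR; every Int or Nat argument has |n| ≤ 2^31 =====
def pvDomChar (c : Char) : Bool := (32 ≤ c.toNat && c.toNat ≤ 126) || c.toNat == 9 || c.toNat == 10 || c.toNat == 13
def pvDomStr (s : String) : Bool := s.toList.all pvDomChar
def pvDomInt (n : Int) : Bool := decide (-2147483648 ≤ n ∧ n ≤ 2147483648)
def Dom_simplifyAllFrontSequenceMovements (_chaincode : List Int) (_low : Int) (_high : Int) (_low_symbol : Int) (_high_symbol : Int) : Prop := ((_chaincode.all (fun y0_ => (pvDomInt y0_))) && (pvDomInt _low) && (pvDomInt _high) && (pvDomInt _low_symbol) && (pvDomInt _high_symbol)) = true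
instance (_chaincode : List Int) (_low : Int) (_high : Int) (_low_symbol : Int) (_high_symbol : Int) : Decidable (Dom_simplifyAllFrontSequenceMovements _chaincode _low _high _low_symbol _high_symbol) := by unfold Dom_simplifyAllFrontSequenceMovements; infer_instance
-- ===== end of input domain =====

-- B replaces A's in-place splice-and-rewind loop by a run-decomposition pass building a fresh
-- output list (objective: alternative algorithm of similar cost).  Python A mutates its argument
-- in place; Python B performs the same final in-place write-back, and the equivalence proved
-- here is about the return value.

-- ===== PORT A =====
-- helper simplifyFrontSequenceMovements(num, low, high, ls, hs, next).
-- int(math.floor(_num/_high)) and int(x/_low) use float division in Python; on the admitted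
-- domain (|values| ≤ 2^31, _num a zero-run length) they equal floor division resp. truncating
-- division exactly, so they are ported as PySem.Int.floordiv / PySem.Int.truncdiv.
def simplifyFrontPort (num low high ls hs : Int) (next : List Int) : List Int :=
  let r : Int × Int × Int :=
    if high ≠ -1 then
      (PySem.Int.floordiv num high,
       PySem.Int.truncdiv (PySem.Int.mod num high) low,
       PySem.Int.mod (PySem.Int.mod num high) low)
    else
      (0, PySem.Int.truncdiv num low, PySem.Int.mod num low)
  next ++ List.replicate r.1.toNat hs ++ List.replicate r.2.1.toNat ls
       ++ List.replicate r.2.2.toNat 0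

-- the `elif _chaincode[i] != 0:` block of A's while loop (the element at i is known ≠ 0):
-- del _chaincode[i-counter:i]; i -= counter; _chaincode[i:i] = next_steps; i += len(next_steps)
def stepBranchA (low high ls hs : Int) (cc : List Int) (i counter : Int) : List Int × Int × Int :=
  if counter ≥ low then
    let ns := simplifyFrontPort counter low high ls hs []
    let cc1 := PySem.List.slice cc none (some (i - counter)) ++ PySem.List.slice cc (some i) none
    let i1 := i - counter
    let cc2 := PySem.List.slice cc1 none (some i1) ++ ns ++ PySem.List.slice cc1 (some i1) none
    (cc2, i1 + (ns.length : Int), 0)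
  else (cc, i, 0)

-- the `if i == len(_chaincode)-1:` block of A's while loop
def stepEndA (low high ls hs : Int) (cc : List Int) (i counter : Int) : List Int × Int × Int :=
  if i = (cc.length : Int) - 1 then
    if counter ≥ low then
      let ns := simplifyFrontPort counter low high ls hs []
      let cc1 := PySem.List.slice cc none (some ((cc.length : Int) - counter))
                 ++ PySem.List.slice cc (some (cc.length : Int)) none
      let i1 := i - counter
      (cc1 ++ ns, i1 + (ns.length : Int), 0)
    else (cc, i, 0)
  else (cc, i, counter)

-- A's while loop; each iteration decreases len(_chaincode) - i by exactly one, so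
-- fuel = initial length + 1 runs it to completion (the fuel-0 branch is never reached).
def loopA (low high ls hs : Int) : Nat → List Int → Int → Int → List Int
  | 0, cc, _, _ => cc
  | fuel + 1, cc, i, counter =>
    if i < (cc.length : Int) then
      let x := (PySem.List.pyGet? cc i).getD 0
      let s1 : List Int × Int × Int :=
        if x = 0 then (cc, i, counter + 1)
        else stepBranchA low high ls hs cc i counter
      let s2 := stepEndA low high ls hs s1.1 s1.2.1 s1.2.2
      loopA low high ls hs fuel s2.1 (s2.2.1 + 1) s2.2.2
    else cc

def simplifyAllFrontSequenceMovements (_chaincode : List Int) (_low : Int) (_high : Int) (_low_symbol : Int) (_high_symbol : Int) : List Int :=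
  loopA _low _high _low_symbol _high_symbol (_chaincode.length + 1) _chaincode 0 0

-- ===== PORT B =====
-- length of the maximal leading run of value v (the inner `while k < n and _chaincode[k] == v` scan)
def runLenB (v : Int) : List Int → Nat
  | [] => 0
  | x :: t => if x = v then runLenB v t + 1 else 0

-- outer loop of B: split off one maximal run, emit its compression (or the run verbatim), recurse.
-- Each round consumes ≥ 1 element, so fuel = length of the list runs it to completion.
def bLoopF (low high ls hs : Int) : Nat → List Int → List Int
  | _, [] => []
  | 0, _ :: _ => []
  | fuel + 1, v :: t =>
    let k := runLenB v t + 1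
    (if v = 0 ∧ (k : Int) ≥ low then simplifyFrontPort (k : Int) low high ls hs []
     else (v :: t).take k) ++ bLoopF low high ls hs fuel ((v :: t).drop k)

def simplifyAllFrontSequenceMovements_alt (_chaincode : List Int) (_low : Int) (_high : Int) (_low_symbol : Int) (_high_symbol : Int) : List Int :=
  bLoopF _low _high _low_symbol _high_symbol _chaincode.length _chaincode

-- ===== PRECONDITION & SPEC =====
-- Pre_ excludes exactly the inputs on which Python A raises ZeroDivisionError: _low = 0 or
-- _high = 0 while a nonempty _chaincode contains a run of at least _low zeros (there the
-- helper is invoked and divides/mods by zero).  On every other input A returns normally.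
def Pre_simplifyAllFrontSequenceMovements (_chaincode : List Int) (_low : Int) (_high : Int) (_low_symbol : Int) (_high_symbol : Int) : Prop :=
  ¬ ((_low = 0 ∨ _high = 0) ∧ _chaincode ≠ [] ∧ (List.replicate _low.toNat (0 : Int)) <:+: _chaincode)
instance (_chaincode : List Int) (_low : Int) (_high : Int) (_low_symbol : Int) (_high_symbol : Int) : Decidable (Pre_simplifyAllFrontSequenceMovements _chaincode _low _high _low_symbol _high_symbol) := by unfold Pre_simplifyAllFrontSequenceMovements; infer_instance

def pvWitness_simplifyAllFrontSequenceMovements : List Int × Int × Int × Int × Int :=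
  ([0, 0, 0, 1, 0, 2], 2, 3, 6, 7)

def Spec_simplifyAllFrontSequenceMovements (_chaincode : List Int) (_low : Int) (_high : Int) (_low_symbol : Int) (_high_symbol : Int) (out : List Int) : Prop := out = simplifyAllFrontSequenceMovements_alt _chaincode _low _high _low_symbol _high_symbol
instance (_chaincode : List Int) (_low : Int) (_high : Int) (_low_symbol : Int) (_high_symbol : Int) (out : List Int) : Decidable (Spec_simplifyAllFrontSequenceMovements _chaincode _low _high _low_symbol _high_symbol out) := by unfold Spec_simplifyAllFrontSequenceMovements; infer_instance

-- ===== CLAIM (what is proved, stated in full; the proofs are below) =====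
def Claim_equal_simplifyAllFrontSequenceMovements : Prop := ∀ (_chaincode : List Int) (_low : Int) (_high : Int) (_low_symbol : Int) (_high_symbol : Int), Dom_simplifyAllFrontSequenceMovements _chaincode _low _high _low_symbol _high_symbol → Pre_simplifyAllFrontSequenceMovements _chaincode _low _high _low_symbol _high_symbol → Spec_simplifyAllFrontSequenceMovements _chaincode _low _high _low_symbol _high_symbol (simplifyAllFrontSequenceMovements _chaincode _low _high _low_symbol _high_symbol)

-- ===== LEMMAS AND PROOFS =====

theorem ns_zero (low high ls hs : Int) : simplifyFrontPort 0 low high ls hs [] = [] := by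
  unfold simplifyFrontPort
  split <;> simp [PySem.Int.floordiv, PySem.Int.mod, PySem.Int.truncdiv]

-- flush of a pending run of c zeros, and the single-pass characterisation `emit` of A's loop
def flushE (low high ls hs : Int) (c : Nat) : List Int :=
  if (c : Int) ≥ low then simplifyFrontPort (c : Int) low high ls hs [] else List.replicate c 0

def emit (low high ls hs : Int) (c : Nat) : List Int → List Int
  | [] => List.replicate c 0
  | x :: r =>
    if x = 0 then (if r = [] then flushE low high ls hs (c + 1) else emit low high ls hs (c + 1) r)
    else flushE low high ls hs c ++ x :: emit low high ls hs 0 r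

theorem flushE_zero (low high ls hs : Int) : flushE low high ls hs 0 = [] := by
  unfold flushE; split <;> simp [ns_zero]

theorem slice_to_len (p X : List Int) :
    PySem.List.slice (p ++ X) none (some ((p.length : Nat) : Int)) = p := by
  rw [PySem.List.slice_to_natCast, List.take_left]

theorem slice_from_len (p X : List Int) :
    PySem.List.slice (p ++ X) (some ((p.length : Nat) : Int)) none = X := by
  rw [PySem.List.slice_from_natCast, List.drop_left]

theorem get_mid (p r : List Int) (c : Nat) (x : Int) :
    PySem.List.pyGet? (p ++ (List.replicate c (0 : Int) ++ x :: r)) ((p.length : Int) + (c : Int))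
      = some x := by
  have h : ((p.length : Int) + (c : Int)) = (((p ++ List.replicate c (0 : Int)).length : Nat) : Int) := by
    simp
  rw [h, ← List.append_assoc, PySem.List.pyGet?_append_length]

theorem stepBranch_flush (low high ls hs : Int) (p r : List Int) (c : Nat)
    (hc : (c : Int) ≥ low) :
    stepBranchA low high ls hs (p ++ (List.replicate c (0 : Int) ++ r)) ((p.length : Int) + c) c
      = (p ++ simplifyFrontPort c low high ls hs [] ++ r,
         (p.length : Int) + ((simplifyFrontPort c low high ls hs []).length : Int), 0) := by
  unfold stepBranchA
  rw [if_pos hc]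
  simp only []
  have h1 : ((p.length : Int) + c - c) = ((p.length : Nat) : Int) := by ring
  have h2 : ((p.length : Int) + c) = (((p ++ List.replicate c (0 : Int)).length : Nat) : Int) := by
    simp
  rw [h1, slice_to_len]
  rw [h2, ← List.append_assoc, slice_from_len, List.append_assoc]
  rw [slice_to_len, slice_from_len]
  simp

theorem stepEnd_zero_counter (low high ls hs : Int) (cc : List Int) (i : Int) :
    stepEndA low high ls hs cc i 0 = (cc, i, 0) := by
  unfold stepEndA
  split
  · split
    · simp only [sub_zero]
      rw [ns_zero, PySem.List.slice_to_natCast, PySem.List.slice_from_natCast]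
      simp
    · rfl
  · rfl

theorem stepEnd_not_last (low high ls hs : Int) (cc : List Int) (i counter : Int)
    (h : ¬ i = (cc.length : Int) - 1) :
    stepEndA low high ls hs cc i counter = (cc, i, counter) := by
  unfold stepEndA; rw [if_neg h]

theorem stepEnd_last_flush (low high ls hs : Int) (q : List Int) (c : Nat)
    (hc : (c : Int) ≥ low) :
    stepEndA low high ls hs (q ++ List.replicate c (0 : Int)) ((q.length : Int) + c - 1) c
      = ((q ++ simplifyFrontPort c low high ls hs []),
         (q.length : Int) - 1 + ((simplifyFrontPort c low high ls hs []).length : Int), 0) := by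
  unfold stepEndA
  have hlen : (((q ++ List.replicate c (0 : Int)).length : Nat) : Int) = (q.length : Int) + c := by
    simp
  rw [hlen, if_pos rfl, if_pos hc]
  simp only []
  have h1 : ((q.length : Int) + c - c) = ((q.length : Nat) : Int) := by ring
  have h2 : ((q.length : Int) + c) = (((q ++ List.replicate c (0 : Int)).length : Nat) : Int) := by
    simp
  rw [h1, slice_to_len, h2, PySem.List.slice_from_natCast, List.drop_length]
  have h3 : ((q.length : Int) + c - 1 - c) = (q.length : Int) - 1 := by ring
  rw [hlen, h3]
  simp

theorem loopA_succ (low high ls hs : Int) (f : Nat) (cc : List Int) (i counter : Int) :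
    loopA low high ls hs (f + 1) cc i counter =
      if i < (cc.length : Int) then
        (let x := (PySem.List.pyGet? cc i).getD 0
         let s1 : List Int × Int × Int :=
           if x = 0 then (cc, i, counter + 1)
           else stepBranchA low high ls hs cc i counter
         let s2 := stepEndA low high ls hs s1.1 s1.2.1 s1.2.2
         loopA low high ls hs f s2.1 (s2.2.1 + 1) s2.2.2)
      else cc := rfl

theorem loopA_emit (low high ls hs : Int) :
    ∀ (r p : List Int) (c : Nat), (r = [] → c = 0) →
      loopA low high ls hs (r.length + 1) (p ++ (List.replicate c (0 : Int) ++ r))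
          ((p.length : Int) + c) c
        = p ++ emit low high ls hs c r := by
  intro r
  induction r with
  | nil =>
    intro p c h0
    have hc := h0 rfl; subst hc
    rw [loopA_succ]
    rw [if_neg (by simp)]
    simp [emit]
  | cons x r' ih =>
    intro p c h0
    have hlen : (((p ++ (List.replicate c (0 : Int) ++ x :: r')).length : Nat) : Int)
        = (p.length : Int) + c + 1 + r'.length := by
      simp only [List.length_append, List.length_replicate, List.length_cons]
      push_cast; ring
    rw [show (x :: r').length + 1 = r'.length + 1 + 1 from by simp]
    rw [loopA_succ]
    rw [if_pos (by rw [hlen]; omega)]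
    simp only [get_mid, Option.getD_some]
    by_cases hx : x = 0
    · subst hx
      rw [if_pos rfl]
      simp only []
      by_cases hr : r' = []
      · subst hr
        -- last element is a zero: the end-check fires with counter = c+1
        have hrepl : p ++ (List.replicate c (0 : Int) ++ [0])
            = p ++ List.replicate (c + 1) (0 : Int) := by
          simp [List.replicate_succ']
        by_cases hlow : ((c : Int) + 1 ≥ low)
        · have hstep := stepEnd_last_flush low high ls hs p (c + 1)
            (by push_cast; exact hlow)
          have hi : ((p.length : Int) + c) = (p.length : Int) + (c + 1 : Nat) - 1 := by
            push_cast; ring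
          rw [hrepl, show ((c : Int) + 1) = ((c + 1 : Nat) : Int) from by push_cast; ring, hi,
            hstep]
          simp only []
          rw [loopA_succ]
          rw [if_neg (by
            simp only [List.length_append]
            push_cast; omega)]
          rw [show emit low high ls hs c [0]
              = flushE low high ls hs (c + 1) from by
            rw [emit]; rw [if_pos rfl, if_pos rfl]]
          rw [flushE, if_pos (by push_cast; exact hlow)]
        · have hcond : ((p.length : Int) + c)
              = (((p ++ (List.replicate c (0 : Int) ++ [0])).length : Nat) : Int) - 1 := by
            simp only [List.length_append, List.length_replicate, List.length_cons,
              List.length_nil]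
            push_cast; ring
          rw [show stepEndA low high ls hs (p ++ (List.replicate c (0 : Int) ++ [0]))
                ((p.length : Int) + c) ((c : Int) + 1)
              = (p ++ (List.replicate c (0 : Int) ++ [0]), (p.length : Int) + c, 0) from by
            unfold stepEndA
            rw [if_pos hcond, if_neg (by omega)]]
          simp only []
          rw [loopA_succ]
          rw [if_neg (by rw [hlen]; simp only [List.length_nil]; push_cast; omega)]
          rw [hrepl]
          rw [show emit low high ls hs c [0]
              = flushE low high ls hs (c + 1) from by
            rw [emit]; rw [if_pos rfl, if_pos rfl]]
          rw [flushE, if_neg (by push_cast at hlow ⊢; omega)]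
      · -- a zero that is not the last element: just count it
        have hnotlast : ¬ ((p.length : Int) + c)
            = (((p ++ (List.replicate c (0 : Int) ++ (0 : Int) :: r')).length : Nat) : Int) - 1 := by
          have hr1 : r'.length ≥ 1 := by
            cases r' with
            | nil => exact absurd rfl hr
            | cons a b => simp
          simp only [List.length_append, List.length_replicate, List.length_cons]
          push_cast; omega
        rw [stepEnd_not_last low high ls hs _ _ _ hnotlast]
        simp only []
        have hsh : p ++ (List.replicate c (0 : Int) ++ (0 : Int) :: r')
            = p ++ (List.replicate (c + 1) (0 : Int) ++ r') := by
          simp [List.replicate_succ']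
        have hi : (p.length : Int) + c + 1 = (p.length : Int) + ((c + 1 : Nat) : Int) := by
          push_cast; ring
        rw [hsh, show ((c : Int) + 1) = ((c + 1 : Nat) : Int) from by push_cast; ring, hi,
          ih p (c + 1) (fun h => absurd h hr)]
        rw [show emit low high ls hs c ((0 : Int) :: r')
            = emit low high ls hs (c + 1) r' from by
          rw [emit]; rw [if_pos rfl, if_neg hr]]
    · -- a nonzero element: maybe flush the pending zeros, then move on
      rw [if_neg hx]
      by_cases hlow : ((c : Int) ≥ low)
      · rw [stepBranch_flush low high ls hs p (x :: r') c hlow]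
        simp only []
        rw [stepEnd_zero_counter]
        simp only []
        set ns := simplifyFrontPort (c : Int) low high ls hs [] with hns
        have ih0 := ih (p ++ ns ++ [x]) 0 (fun _ => rfl)
        simp only [Nat.cast_zero, add_zero, List.replicate_zero, List.nil_append] at ih0
        have hre : p ++ ns ++ x :: r' = (p ++ ns ++ [x]) ++ r' := by simp
        have hi2 : (p.length : Int) + (ns.length : Int) + 1
            = (((p ++ ns ++ [x]).length : Nat) : Int) := by
          simp only [List.length_append, List.length_cons, List.length_nil]
          push_cast; ring
        rw [hre, hi2, ih0]
        rw [show emit low high ls hs c (x :: r')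
            = flushE low high ls hs c ++ x :: emit low high ls hs 0 r' from by
          rw [emit, if_neg hx]]
        rw [flushE, if_pos hlow, ← hns]
        simp
      · rw [show stepBranchA low high ls hs (p ++ (List.replicate c (0 : Int) ++ x :: r'))
              ((p.length : Int) + c) (c : Int)
            = (p ++ (List.replicate c (0 : Int) ++ x :: r'), (p.length : Int) + c, 0) from by
          unfold stepBranchA; rw [if_neg hlow]]
        simp only []
        rw [stepEnd_zero_counter]
        simp only []
        have ih0 := ih (p ++ List.replicate c (0 : Int) ++ [x]) 0 (fun _ => rfl)
        simp only [Nat.cast_zero, add_zero, List.replicate_zero, List.nil_append] at ih0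
        have hre : p ++ (List.replicate c (0 : Int) ++ x :: r')
            = (p ++ List.replicate c (0 : Int) ++ [x]) ++ r' := by simp
        have hi2 : (p.length : Int) + (c : Int) + 1
            = (((p ++ List.replicate c (0 : Int) ++ [x]).length : Nat) : Int) := by
          simp only [List.length_append, List.length_replicate, List.length_cons,
            List.length_nil]
          push_cast; ring
        rw [hre, hi2, ih0]
        rw [show emit low high ls hs c (x :: r')
            = flushE low high ls hs c ++ x :: emit low high ls hs 0 r' from by
          rw [emit, if_neg hx]]
        rw [flushE, if_neg hlow]
        simp

theorem take_runLenB (v : Int) (t : List Int) :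
    t.take (runLenB v t) = List.replicate (runLenB v t) v := by
  induction t with
  | nil => simp [runLenB]
  | cons x t ih =>
    by_cases h : x = v
    · subst h; simp [runLenB, ih, List.replicate_succ]
    · simp [runLenB, h]

theorem drop_runLenB_head (v : Int) (t : List Int) :
    ¬ (t.drop (runLenB v t)).head? = some v := by
  induction t with
  | nil => simp [runLenB]
  | cons x t ih =>
    by_cases h : x = v
    · subst h; simpa [runLenB] using ih
    · simp [runLenB, h]

theorem emit_replicate (low high ls hs : Int) :
    ∀ (k c : Nat) (t : List Int), ¬ t.head? = some 0 →
      emit low high ls hs c (List.replicate (k + 1) (0 : Int) ++ t)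
        = flushE low high ls hs (c + (k + 1)) ++ emit low high ls hs 0 t := by
  intro k
  induction k with
  | zero =>
    intro c t ht
    cases t with
    | nil => simp [emit]
    | cons x t' =>
      have hx : ¬ x = 0 := by simpa using ht
      simp [emit, hx, flushE_zero]
  | succ k ih =>
    intro c t ht
    have hne : List.replicate (k + 1) (0 : Int) ++ t ≠ [] := by
      simp
    have : List.replicate (k + 1 + 1) (0 : Int) ++ t
        = 0 :: (List.replicate (k + 1) (0 : Int) ++ t) := by
      simp [List.replicate_succ]
    rw [this]
    simp only [emit, if_neg hne]
    rw [ih (c + 1) t ht]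
    have harith : c + 1 + (k + 1) = c + (k + 1 + 1) := by omega
    rw [harith]
    simp

theorem emit_run_nonzero (low high ls hs : Int) (v : Int) (hv : ¬ v = 0) :
    ∀ t : List Int, emit low high ls hs 0 t
      = t.take (runLenB v t) ++ emit low high ls hs 0 (t.drop (runLenB v t)) := by
  intro t
  induction t with
  | nil => simp [runLenB]
  | cons x t ih =>
    by_cases h : x = v
    · subst h
      simp only [runLenB]
      rw [show emit low high ls hs 0 (x :: t) = flushE low high ls hs 0 ++ x :: emit low high ls hs 0 t from by simp [emit, hv]]
      rw [flushE_zero, ih]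
      simp
    · simp [runLenB, h]

theorem bLoopF_emit (low high ls hs : Int) :
    ∀ (f : Nat) (l : List Int), l.length ≤ f →
      bLoopF low high ls hs f l = emit low high ls hs 0 l := by
  intro f
  induction f with
  | zero =>
    intro l hl
    have : l = [] := List.eq_nil_of_length_eq_zero (Nat.le_zero.mp hl)
    subst this; simp [bLoopF, emit]
  | succ f ih =>
    intro l hl
    cases l with
    | nil => simp [bLoopF, emit]
    | cons v t =>
      have hdrop : ((v :: t).drop (runLenB v t + 1)).length ≤ f := by
        simp only [List.length_drop, List.length_cons]
        simp at hl
        omega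
      by_cases hv : v = 0
      · subst hv
        have hsplit : (0 : Int) :: t
            = List.replicate (runLenB (0 : Int) t + 1) (0 : Int) ++ t.drop (runLenB (0 : Int) t) := by
          conv_lhs => rw [← List.take_append_drop (runLenB (0 : Int) t) t]
          rw [take_runLenB]
          simp [List.replicate_succ]
        have hhead : ¬ (t.drop (runLenB (0 : Int) t)).head? = some 0 :=
          drop_runLenB_head 0 t
        rw [bLoopF]
        simp only []
        rw [ih _ hdrop]
        rw [show emit low high ls hs 0 ((0 : Int) :: t)
            = emit low high ls hs 0
                (List.replicate (runLenB (0 : Int) t + 1) (0 : Int)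
                  ++ t.drop (runLenB (0 : Int) t)) from by rw [← hsplit]]
        rw [emit_replicate low high ls hs (runLenB (0 : Int) t) 0 _ hhead]
        have hdropeq : (((0 : Int) :: t).drop (runLenB (0 : Int) t + 1))
            = t.drop (runLenB (0 : Int) t) := by simp
        rw [hdropeq]
        congr 1
        rw [show (0 : Nat) + (runLenB (0 : Int) t + 1) = runLenB (0 : Int) t + 1 from by omega]
        by_cases hc : (((runLenB (0 : Int) t + 1 : Nat) : Int) ≥ low)
        · rw [if_pos ⟨trivial, hc⟩, flushE, if_pos hc]
        · rw [if_neg (by intro h; exact hc h.2), flushE, if_neg hc]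
          rw [show ((0 : Int) :: t).take (runLenB (0 : Int) t + 1)
              = 0 :: t.take (runLenB (0 : Int) t) from rfl]
          rw [take_runLenB]
          simp [List.replicate_succ]
      · rw [bLoopF]
        rw [if_neg (by intro h; exact hv h.1)]
        rw [ih _ hdrop]
        rw [show emit low high ls hs 0 (v :: t)
            = flushE low high ls hs 0 ++ v :: emit low high ls hs 0 t from by
          rw [emit, if_neg hv]]
        rw [flushE_zero, emit_run_nonzero low high ls hs v hv t]
        simp

-- ===== VERDICT =====
theorem simplifyAllFrontSequenceMovements_spec : Claim_equal_simplifyAllFrontSequenceMovements := by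
  intro cc low high ls hs _hDom _hPre
  unfold Spec_simplifyAllFrontSequenceMovements simplifyAllFrontSequenceMovements simplifyAllFrontSequenceMovements_alt
  have hA := loopA_emit low high ls hs cc [] 0 (fun _ => rfl)
  simp only [List.nil_append, List.replicate_zero, List.length_nil, Nat.cast_zero, add_zero] at hA
  rw [hA, bLoopF_emit low high ls hs cc.length cc (le_refl _)]
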